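-- pv_equiv track=rewrite | github.com/vipinsaini27/DSAlgo | Day 10 - Problems on Arrays/Closest MinMax.py | solve
-- ===== SOURCE A (Python) =====
-- def solve(A):
--     mx = max(A)
--     mi = min(A)
--     mxI = None
--     miI = None
--     ans = None
--     i = 0
--     while i < len(A):
--         val = A[i]
--         if val == mx:
--             mxI = i
--         if val == mi:
--             miI = i
--
--         if mxI is not None and miI is not None:
--             if ans is None:
--                 ans = abs(mxI - miI) + 1
--             elif ans > abs(mxI - miI) + 1:
--                 ans = abs(mxI - miI) + 1
--
--         i += 1
--
--     return ans
-- ===== SOURCE B (Python) =====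
-- def solve(A):
--     mx = max(A)
--     mi = min(A)
--     maxPos = [i for i, v in enumerate(A) if v == mx]
--     minPos = [i for i, v in enumerate(A) if v == mi]
--     return min(abs(a - b) for a in maxPos for b in minPos) + 1
-- ===== Notes on version B (the rewrite author's own statement) =====
-- stated objective: alternative
-- what changed: Replaces the incremental last-seen-index/running-answer while loop by a collect-then-combine decomposition: gather all positions of the max and of the min, then take the minimum absolute distance over the pairs and add 1.
import Mathlib
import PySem

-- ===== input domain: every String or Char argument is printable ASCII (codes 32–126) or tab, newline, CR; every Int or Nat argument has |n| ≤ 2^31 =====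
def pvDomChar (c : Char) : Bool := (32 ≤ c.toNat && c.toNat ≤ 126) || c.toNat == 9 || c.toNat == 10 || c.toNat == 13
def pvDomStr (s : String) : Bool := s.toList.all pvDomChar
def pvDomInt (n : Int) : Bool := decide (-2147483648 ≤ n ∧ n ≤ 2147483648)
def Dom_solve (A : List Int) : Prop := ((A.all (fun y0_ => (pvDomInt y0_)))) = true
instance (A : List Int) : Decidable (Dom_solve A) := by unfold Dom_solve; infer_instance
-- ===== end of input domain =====

-- B restates A as collect-then-combine (positions of max/min, min pairwise distance); same cost class, no speed claim.

-- ===== PORT A =====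
-- the while loop of A: walks the list keeping (last max index, last min index, running answer)
def solveLoop (mx mi : Int) : List Int → Int → Option Int → Option Int → Option Int →
    Option Int × Option Int × Option Int
  | [], _, mxI, miI, ans => (mxI, miI, ans)
  | v :: rest, i, mxI, miI, ans =>
    let mxI' := if v = mx then some i else mxI
    let miI' := if v = mi then some i else miI
    let ans' :=
      match mxI', miI' with
      | some a, some b =>
        match ans with
        | none => some (|a - b| + 1)
        | some c => if c > |a - b| + 1 then some (|a - b| + 1) else some c
      | _, _ => ans
    solveLoop mx mi rest (i + 1) mxI' miI' ans'

def solve (A : List Int) : Int :=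
  match PySem.List.max? A (fun x => x), PySem.List.min? A (fun x => x) with
  | some mx, some mi => (solveLoop mx mi A 0 none none none).2.2.getD 0  -- ans is an int for nonempty A
  | _, _ => 0  -- Python raises ValueError on max([]); excluded by Pre_solve

-- ===== PORT B =====
def solve_alt (A : List Int) : Int :=
  match PySem.List.max? A (fun x => x), PySem.List.min? A (fun x => x) with
  | some mx, some mi =>
    let maxPos := ((PySem.List.enumerate A).filter (fun p => p.2 = mx)).map (fun p => p.1)
    let minPos := ((PySem.List.enumerate A).filter (fun p => p.2 = mi)).map (fun p => p.1)
    ((PySem.List.min? (maxPos.flatMap (fun a => minPos.map (fun b => |a - b|)))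
        (fun x => x)).getD 0) + 1  -- the pair list is nonempty for nonempty A
  | _, _ => 0  -- Python raises ValueError on max([]); excluded by Pre_solve

-- ===== PRECONDITION & SPEC =====
-- Pre_ excludes only the empty list, on which A's max(A) raises ValueError (B raises there too).
def Pre_solve (A : List Int) : Prop := A ≠ []
instance (A : List Int) : Decidable (Pre_solve A) := by unfold Pre_solve; infer_instance
def pvWitness_solve : List Int := [3, 1, 2, 3, 1]

def Spec_solve (A : List Int) (out : Int) : Prop := out = solve_alt A
instance (A : List Int) (out : Int) : Decidable (Spec_solve A out) := by unfold Spec_solve; infer_instance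

-- ===== CLAIM (what is proved, stated in full; the proofs are below) =====
def Claim_equal_solve : Prop := ∀ (A : List Int), Dom_solve A → Pre_solve A → Spec_solve A (solve A)

-- ===== LEMMAS AND PROOFS =====

-- positions (as Ints) of value x in the list; literally B's comprehension
def pvPos (x : Int) (l : List Int) : List Int :=
  ((PySem.List.enumerate l).filter (fun p => p.2 = x)).map (fun p => p.1)

-- min |a-b| over all pairs, as an Option (none iff one side empty); literally B's min
def pvPairMin (as bs : List Int) : Option Int :=
  PySem.List.min? (as.flatMap (fun a => bs.map (fun b => |a - b|))) (fun x => x)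

def pvOMin : Option Int → Option Int → Option Int
  | none, y => y
  | some c, none => some c
  | some c, some d => some (min c d)

theorem pvMinChar (l : List Int) (m : Int) :
    PySem.List.min? l (fun x => x) = some m ↔ m ∈ l ∧ ∀ x ∈ l, m ≤ x := by
  constructor
  · intro h
    exact ⟨PySem.List.min?_mem h, PySem.List.min?_isMin h⟩
  · rintro ⟨hm, hmin⟩
    cases h' : PySem.List.min? l (fun x => x) with
    | none =>
      rw [PySem.List.min?_eq_none_iff] at h'
      simp [h'] at hm
    | some m' =>
      have h1 := PySem.List.min?_isMin h' m hm
      have h2 := hmin m' (PySem.List.min?_mem h')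
      have : m = m' := le_antisymm h2 h1
      rw [this]

theorem pvPairMin_none_iff (as bs : List Int) :
    pvPairMin as bs = none ↔ as = [] ∨ bs = [] := by
  rw [pvPairMin, PySem.List.min?_eq_none_iff, List.flatMap_eq_nil_iff]
  constructor
  · intro h
    by_cases ha : as = []
    · exact Or.inl ha
    · right
      obtain ⟨a, hamem⟩ := List.exists_mem_of_ne_nil as ha
      have := h _ hamem
      simpa using this
  · rintro (rfl | rfl) <;> simp

theorem pvPairMin_char (as bs : List Int) (c : Int) :
    pvPairMin as bs = some c ↔
      (∃ a ∈ as, ∃ b ∈ bs, c = |a - b|) ∧ ∀ a ∈ as, ∀ b ∈ bs, c ≤ |a - b| := by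
  rw [pvPairMin, pvMinChar]
  simp only [List.mem_flatMap, List.mem_map]
  constructor
  · rintro ⟨⟨a, ha, b, hb, rfl⟩, hmin⟩
    exact ⟨⟨a, ha, b, hb, rfl⟩, fun a' ha' b' hb' => hmin _ ⟨a', ha', b', hb', rfl⟩⟩
  · rintro ⟨⟨a, ha, b, hb, rfl⟩, hmin⟩
    exact ⟨⟨a, ha, b, hb, rfl⟩, by rintro x ⟨a', ha', b', hb', rfl⟩; exact hmin a' ha' b' hb'⟩

theorem pvPairMin_nonneg (as bs : List Int) (c : Int) (h : pvPairMin as bs = some c) : 0 ≤ c := by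
  obtain ⟨⟨a, _, b, _, rfl⟩, _⟩ := (pvPairMin_char as bs c).mp h
  exact abs_nonneg _

theorem pvPairMin_snoc_right (as bs : List Int) (n l : Int)
    (hl : bs.getLast? = some l) (hle : ∀ b ∈ bs, b ≤ l) (hlt : ∀ b ∈ bs, b < n) :
    pvPairMin (as ++ [n]) bs = pvOMin (pvPairMin as bs) (some (n - l)) := by
  have hlmem : l ∈ bs := List.mem_of_getLast? hl
  have hln : l < n := hlt l hlmem
  cases hPM : pvPairMin as bs with
  | none =>
    rcases (pvPairMin_none_iff as bs).mp hPM with rfl | rfl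
    · simp only [pvOMin, List.nil_append]
      rw [pvPairMin_char]
      refine ⟨⟨n, by simp, l, hlmem, (abs_of_nonneg (by omega)).symm⟩, ?_⟩
      intro a ha b hb
      have ha' : a = n := by simpa using ha
      rw [ha']
      have h1 := hle b hb
      have h2 := hlt b hb
      rw [abs_of_nonneg (by omega)]
      omega
    · simp at hlmem
  | some c =>
    rw [pvOMin]
    rw [pvPairMin_char]
    obtain ⟨⟨a₀, ha₀, b₀, hb₀, hc⟩, hmin⟩ := (pvPairMin_char as bs c).mp hPM
    constructor
    · rcases le_total c (n - l) with hcl | hcl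
      · rw [min_eq_left hcl]
        exact ⟨a₀, List.mem_append_left _ ha₀, b₀, hb₀, by omega⟩
      · rw [min_eq_right hcl]
        refine ⟨n, List.mem_append_right _ (by simp), l, hlmem, ?_⟩
        rw [abs_of_nonneg] <;> omega
    · intro a ha b hb
      rcases List.mem_append.mp ha with ha' | ha'
      · exact le_trans (min_le_left _ _) (hmin a ha' b hb)
      · have han : a = n := by simpa using ha'
        rw [han]
        have h1 := hle b hb
        have h2 := hlt b hb
        have : |n - b| = n - b := abs_of_nonneg (by omega)
        rw [this]
        have := min_le_right c (n - l)
        omega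

theorem pvPairMin_snoc_left (as bs : List Int) (n l : Int)
    (hl : as.getLast? = some l) (hle : ∀ a ∈ as, a ≤ l) (hlt : ∀ a ∈ as, a < n) :
    pvPairMin as (bs ++ [n]) = pvOMin (pvPairMin as bs) (some (n - l)) := by
  have hlmem : l ∈ as := List.mem_of_getLast? hl
  have hln : l < n := hlt l hlmem
  cases hPM : pvPairMin as bs with
  | none =>
    rcases (pvPairMin_none_iff as bs).mp hPM with rfl | rfl
    · simp at hlmem
    · simp only [pvOMin, List.nil_append]
      rw [pvPairMin_char]
      refine ⟨⟨l, hlmem, n, by simp, by rw [abs_sub_comm, abs_of_nonneg (by omega)]⟩, ?_⟩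
      intro a ha b hb
      have hb' : b = n := by simpa using hb
      rw [hb']
      have h1 := hle a ha
      have h2 := hlt a ha
      rw [abs_sub_comm, abs_of_nonneg (by omega)]
      omega
  | some c =>
    rw [pvOMin]
    rw [pvPairMin_char]
    obtain ⟨⟨a₀, ha₀, b₀, hb₀, hc⟩, hmin⟩ := (pvPairMin_char as bs c).mp hPM
    constructor
    · rcases le_total c (n - l) with hcl | hcl
      · rw [min_eq_left hcl]
        exact ⟨a₀, ha₀, b₀, List.mem_append_left _ hb₀, by omega⟩
      · rw [min_eq_right hcl]
        refine ⟨l, hlmem, n, List.mem_append_right _ (by simp), ?_⟩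
        rw [abs_sub_comm, abs_of_nonneg (by omega)]
    · intro a ha b hb
      rcases List.mem_append.mp hb with hb' | hb'
      · exact le_trans (min_le_left _ _) (hmin a ha b hb')
      · have hbn : b = n := by simpa using hb'
        rw [hbn]
        have h1 := hle a ha
        have h2 := hlt a ha
        rw [abs_sub_comm, abs_of_nonneg (by omega)]
        have := min_le_right c (n - l)
        omega

theorem pvPairMin_snoc_both (as bs : List Int) (n : Int) :
    pvPairMin (as ++ [n]) (bs ++ [n]) = some 0 := by
  rw [pvPairMin_char]
  refine ⟨⟨n, List.mem_append_right _ (by simp), n, List.mem_append_right _ (by simp), by simp⟩,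
    fun a _ b _ => abs_nonneg _⟩

theorem pvPos_append (x : Int) (p : List Int) (v : Int) :
    pvPos x (p ++ [v]) = pvPos x p ++ (if v = x then [(p.length : Int)] else []) := by
  rw [pvPos, pvPos, PySem.List.enumerate_append, List.filter_append, List.map_append]
  congr 1
  simp [PySem.List.enumerate]
  split_ifs <;> simp_all

theorem pvPos_mem_lt (x : Int) (p : List Int) (j : Int) (h : j ∈ pvPos x p) :
    0 ≤ j ∧ j < (p.length : Int) := by
  rw [pvPos] at h
  simp only [List.mem_map, List.mem_filter] at h
  obtain ⟨⟨i, v⟩, ⟨hmem, _⟩, rfl⟩ := h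
  rw [PySem.List.mem_enumerate_iff] at hmem
  obtain ⟨k, hk, heq⟩ := hmem
  simp at heq
  omega

theorem pvPos_pairwise (x : Int) (p : List Int) : (pvPos x p).Pairwise (· < ·) := by
  rw [pvPos]
  exact List.Pairwise.map _ (fun a b h => h) ((PySem.List.pairwise_lt_enumerate p 0).filter _)

theorem pairwise_lt_last_max {l : List Int} (hp : l.Pairwise (· < ·)) :
    ∀ j ∈ l, ∀ m, l.getLast? = some m → j ≤ m := by
  induction l with
  | nil => simp
  | cons a t ih =>
    intro j hj m hm
    cases t with
    | nil =>
      simp at hj hm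
      omega
    | cons b t' =>
      rw [List.getLast?_cons_cons] at hm
      have hp' := List.pairwise_cons.mp hp
      rcases List.mem_cons.mp hj with rfl | hj'
      · have hb : b ∈ b :: t' := List.mem_cons_self
        have := ih hp'.2 b hb m hm
        have := hp'.1 b hb
        omega
      · exact ih hp'.2 j hj' m hm

theorem pvPos_ne_nil (x : Int) (p : List Int) (h : x ∈ p) : pvPos x p ≠ [] := by
  obtain ⟨k, hk, rfl⟩ := List.getElem_of_mem h
  rw [pvPos]
  intro hnil
  rw [List.map_eq_nil_iff, List.filter_eq_nil_iff] at hnil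
  exact hnil ((0 : Int) + k, p[k]) ((PySem.List.mem_enumerate_iff p 0 _).mpr ⟨k, hk, rfl⟩) (by simp)

theorem solveLoop_append (mx mi v : Int) (p : List Int) (i : Int)
    (mxI miI ans : Option Int) :
    solveLoop mx mi (p ++ [v]) i mxI miI ans =
      solveLoop mx mi [v] (i + p.length)
        (solveLoop mx mi p i mxI miI ans).1
        (solveLoop mx mi p i mxI miI ans).2.1
        (solveLoop mx mi p i mxI miI ans).2.2 := by
  induction p generalizing i mxI miI ans with
  | nil => simp [solveLoop]
  | cons h t ih =>
    simp only [List.cons_append, solveLoop]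
    rw [ih]
    have hidx : i + 1 + (t.length : Int) = i + ((h :: t).length : Int) := by
      push_cast [List.length_cons]; ring
    rw [hidx]
    simp only [solveLoop]

theorem pvInv (mx mi : Int) (p : List Int) :
    solveLoop mx mi p 0 none none none =
      ((pvPos mx p).getLast?, (pvPos mi p).getLast?,
        (pvPairMin (pvPos mx p) (pvPos mi p)).map (· + 1)) := by
  induction p using List.reverseRecOn with
  | nil => rfl
  | append_singleton p v ih =>
    rw [solveLoop_append, ih]
    simp only [solveLoop, zero_add]
    rw [pvPos_append mx, pvPos_append mi]
    by_cases hmx : v = mx <;> by_cases hmi : v = mi <;>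
      simp only [hmx, hmi, if_pos]
    · -- v = mx and v = mi
      have hmm : mx = mi := by rw [← hmx, ← hmi]
      subst hmm
      simp only [if_true]
      rw [pvPairMin_snoc_both]
      cases hPM : pvPairMin (pvPos mx p) (pvPos mx p) with
      | none => simp [List.getLast?_append]
      | some c =>
        have hc := pvPairMin_nonneg _ _ _ hPM
        simp only [Option.map_some, List.getLast?_append, List.getLast?_singleton, Option.some_or,
          sub_self, abs_zero, Prod.mk.injEq]
        refine ⟨trivial, trivial, ?_⟩
        split_ifs with h
        · simp
        · simp only [Option.some.injEq]
          omega
    · -- v = mx only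
      have hne : mx ≠ mi := by rw [← hmx]; exact hmi
      simp only [if_neg hne, List.append_nil]
      cases hQ : (pvPos mi p).getLast? with
      | none =>
        have hQnil : pvPos mi p = [] := List.getLast?_eq_none_iff.mp hQ
        rw [hQnil]
        have h1 : pvPairMin (pvPos mx p) [] = none := (pvPairMin_none_iff _ _).mpr (Or.inr rfl)
        have h2 : pvPairMin (pvPos mx p ++ [(p.length : Int)]) [] = none :=
          (pvPairMin_none_iff _ _).mpr (Or.inr rfl)
        simp [h1, h2, List.getLast?_append]
      | some l =>
        have hle : ∀ b ∈ pvPos mi p, b ≤ l :=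
          fun b hb => pairwise_lt_last_max (pvPos_pairwise mi p) b hb l hQ
        have hlt : ∀ b ∈ pvPos mi p, b < (p.length : Int) :=
          fun b hb => (pvPos_mem_lt mi p b hb).2
        have hln : l < (p.length : Int) := hlt l (List.mem_of_getLast? hQ)
        rw [pvPairMin_snoc_right _ _ _ _ hQ hle hlt]
        have habs : |(p.length : Int) - l| = (p.length : Int) - l := abs_of_nonneg (by omega)
        cases hPM : pvPairMin (pvPos mx p) (pvPos mi p) with
        | none =>
          simp only [Option.map_none, pvOMin, Option.map_some, List.getLast?_append,
            List.getLast?_singleton, Option.some_or, habs]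
        | some c =>
          simp only [Option.map_some, pvOMin, List.getLast?_append, List.getLast?_singleton,
            Option.some_or, Prod.mk.injEq, habs]
          refine ⟨trivial, trivial, ?_⟩
          split_ifs with h
          · simp only [Option.some.injEq]
            omega
          · simp only [Option.some.injEq]
            omega
    · -- v = mi only
      have hne : mi ≠ mx := by rw [← hmi]; exact hmx
      simp only [if_neg hne, List.append_nil]
      cases hP : (pvPos mx p).getLast? with
      | none =>
        have hPnil : pvPos mx p = [] := List.getLast?_eq_none_iff.mp hP
        rw [hPnil]
        have h1 : pvPairMin [] (pvPos mi p) = none := (pvPairMin_none_iff _ _).mpr (Or.inl rfl)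
        have h2 : pvPairMin [] (pvPos mi p ++ [(p.length : Int)]) = none :=
          (pvPairMin_none_iff _ _).mpr (Or.inl rfl)
        simp [h1, h2, List.getLast?_append]
      | some l =>
        have hle : ∀ a ∈ pvPos mx p, a ≤ l :=
          fun a ha => pairwise_lt_last_max (pvPos_pairwise mx p) a ha l hP
        have hlt : ∀ a ∈ pvPos mx p, a < (p.length : Int) :=
          fun a ha => (pvPos_mem_lt mx p a ha).2
        have hln : l < (p.length : Int) := hlt l (List.mem_of_getLast? hP)
        rw [pvPairMin_snoc_left _ _ _ _ hP hle hlt]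
        have habs : |l - (p.length : Int)| = (p.length : Int) - l := by
          rw [abs_sub_comm]; exact abs_of_nonneg (by omega)
        cases hPM : pvPairMin (pvPos mx p) (pvPos mi p) with
        | none =>
          simp only [Option.map_none, pvOMin, Option.map_some, List.getLast?_append,
            List.getLast?_singleton, Option.some_or, habs]
        | some c =>
          simp only [Option.map_some, pvOMin, List.getLast?_append, List.getLast?_singleton,
            Option.some_or, Prod.mk.injEq, habs]
          refine ⟨trivial, trivial, ?_⟩
          split_ifs with h
          · simp only [Option.some.injEq]
            omega
          · simp only [Option.some.injEq]
            omega
    · -- neither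
      simp only [if_false, List.append_nil]
      cases hP : (pvPos mx p).getLast? with
      | none => rfl
      | some a =>
        cases hQ : (pvPos mi p).getLast? with
        | none => rfl
        | some b =>
          have hPn : pvPos mx p ≠ [] := by
            intro h; rw [h] at hP; simp at hP
          have hQn : pvPos mi p ≠ [] := by
            intro h; rw [h] at hQ; simp at hQ
          cases hPM : pvPairMin (pvPos mx p) (pvPos mi p) with
          | none =>
            rcases (pvPairMin_none_iff _ _).mp hPM with h | h
            · exact absurd h hPn
            · exact absurd h hQn
          | some c =>
            have hc : c ≤ |a - b| :=
              ((pvPairMin_char _ _ _).mp hPM).2 a (List.mem_of_getLast? hP) b (List.mem_of_getLast? hQ)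
            simp only [Option.map_some, Prod.mk.injEq]
            refine ⟨trivial, trivial, ?_⟩
            split_ifs with h
            · omega
            · rfl

-- ===== VERDICT (by name: the statement is the Claim_ definition above) =====
theorem solve_spec : Claim_equal_solve := by
  intro A hDom hPre
  unfold Spec_solve solve solve_alt
  cases hmx : PySem.List.max? A (fun x => x) with
  | none => exact absurd ((PySem.List.max?_eq_none_iff A _).mp hmx) hPre
  | some mx =>
    cases hmi : PySem.List.min? A (fun x => x) with
    | none => exact absurd ((PySem.List.min?_eq_none_iff A _).mp hmi) hPre
    | some mi =>
      simp only
      rw [pvInv]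
      have hmxmem : mx ∈ A := PySem.List.max?_mem hmx
      have hmimem : mi ∈ A := PySem.List.min?_mem hmi
      have hP := pvPos_ne_nil mx A hmxmem
      have hQ := pvPos_ne_nil mi A hmimem
      cases hPM : pvPairMin (pvPos mx A) (pvPos mi A) with
      | none =>
        rcases (pvPairMin_none_iff _ _).mp hPM with h | h
        · exact absurd h hP
        · exact absurd h hQ
      | some c =>
        have : pvPairMin (pvPos mx A) (pvPos mi A) =
            PySem.List.min?
              (((((PySem.List.enumerate A).filter (fun p => p.2 = mx)).map (fun p => p.1)).flatMap
                (fun a => ((((PySem.List.enumerate A).filter (fun p => p.2 = mi)).map (fun p => p.1)).map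
                  (fun b => |a - b|)))))
              (fun x => x) := rfl
        rw [this] at hPM
        rw [hPM]
        simp
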